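-- pv_equiv track=rewrite | github.com/kzajac97/other | d21.py | getStringCounter
-- ===== SOURCE A (Python) =====
-- import collections
--
-- def getStringCounter(string):
--     dWordCount = dict(collections.Counter(string))
--     count2 = False
--     cout3 = False
--     for x in dWordCount.values():
--         if x is 2:
--             count2 = True
--         if x is 3:
--             cout3 = True
--
--     return (count2,cout3)
-- ===== SOURCE B (Python) =====
-- def getStringCounter(string):
--     chars = sorted(string)
--     count2 = False
--     count3 = False
--     while chars:
--         c = chars[0]
--         run = 1
--         while run < len(chars) and chars[run] == c:
--             run += 1
--         if run == 2:
--             count2 = True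
--         if run == 3:
--             count3 = True
--         chars = chars[run:]
--     return (count2, count3)
-- ===== Notes on version B (the rewrite author's own statement) =====
-- stated objective: alternative
-- what changed: B sorts the characters and scans run lengths of equal adjacent characters (sort-then-scan), instead of building a Counter frequency table and iterating its values.
import Mathlib
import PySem

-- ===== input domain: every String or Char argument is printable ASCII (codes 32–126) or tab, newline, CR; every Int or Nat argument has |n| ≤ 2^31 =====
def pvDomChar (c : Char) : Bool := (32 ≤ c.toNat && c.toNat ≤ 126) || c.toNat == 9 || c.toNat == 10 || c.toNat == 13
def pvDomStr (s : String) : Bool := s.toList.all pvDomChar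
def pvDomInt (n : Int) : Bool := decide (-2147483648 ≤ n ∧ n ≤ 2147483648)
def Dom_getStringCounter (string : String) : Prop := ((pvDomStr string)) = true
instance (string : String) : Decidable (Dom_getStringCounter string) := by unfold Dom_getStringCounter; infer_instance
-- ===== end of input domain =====

-- B sorts the characters and scans run lengths of equal adjacent characters instead of building a Counter table (alternative algorithm: sort-then-scan).
-- ===== PORT A =====
def getStringCounter (string : String) : Bool × Bool :=
  let dWordCount := PySem.Dict.counter string.toList
  dWordCount.values.foldl
    (fun (s : Bool × Bool) (x : Int) =>
      (if x = 2 then true else s.1, if x = 3 then true else s.2))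
    (false, false)

-- ===== PORT B =====
-- the outer while loop of Source B: head character, its run length, then the remaining suffix
def bRuns : List Char → Bool → Bool → Bool × Bool
  | [], c2, c3 => (c2, c3)
  | c :: rest, c2, c3 =>
    let run := 1 + (rest.takeWhile (· == c)).length
    bRuns (rest.dropWhile (· == c))
      (if run = 2 then true else c2) (if run = 3 then true else c3)
termination_by l => l.length
decreasing_by simpa using Nat.lt_succ_of_le (List.length_dropWhile_le _ _)

def getStringCounter_alt (string : String) : Bool × Bool :=
  bRuns (PySem.List.sorted string.toList (fun x => x) false) false false

-- ===== PRECONDITION & SPEC =====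
def Spec_getStringCounter (string : String) (out : Bool × Bool) : Prop := out = getStringCounter_alt string
instance (string : String) (out : Bool × Bool) : Decidable (Spec_getStringCounter string out) := by unfold Spec_getStringCounter; infer_instance

-- ===== CLAIM (what is proved, stated in full; the proofs are below) =====
def Claim_equal_getStringCounter : Prop := ∀ (string : String), Dom_getStringCounter string → Spec_getStringCounter string (getStringCounter string)

-- ===== LEMMAS AND PROOFS =====

-- A's loop in closed form
lemma foldFlag (xs : List Int) (init : Bool × Bool) :
    xs.foldl (fun (s : Bool × Bool) (x : Int) =>
      (if x = 2 then true else s.1, if x = 3 then true else s.2)) init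
    = (init.1 || xs.any (· == 2), init.2 || xs.any (· == 3)) := by
  induction xs generalizing init with
  | nil => simp
  | cons x xs ih =>
      simp only [List.foldl_cons, List.any_cons, ih]
      by_cases h2 : x = 2 <;> by_cases h3 : x = 3 <;> simp [h2, h3, beq_eq_decide]

-- in a sorted list c :: rest, the head run is all the c's: its length is rest.count c and no c survives it
lemma run_facts (c : Char) (rest : List Char) (h : (c :: rest).Pairwise (· ≤ ·)) :
    (rest.takeWhile (· == c)).length = rest.count c ∧ c ∉ rest.dropWhile (· == c) := by
  induction rest with
  | nil => simp
  | cons d t ih =>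
      rcases List.pairwise_cons.mp h with ⟨hc, hrest⟩
      by_cases hd : d = c
      · subst hd
        have h' : (d :: t).Pairwise (· ≤ ·) := by
          refine List.pairwise_cons.mpr ⟨?_, (List.pairwise_cons.mp hrest).2⟩
          exact fun y hy => (List.pairwise_cons.mp hrest).1 y hy
        have := ih h'
        simpa [List.takeWhile_cons, List.dropWhile_cons, List.count_cons] using this
      · have hcd : c < d := lt_of_le_of_ne (hc d (by simp)) (fun e => hd e.symm)
        have hnot : c ∉ d :: t := by
          intro hm
          rcases List.mem_cons.mp hm with h1 | h1
          · exact hd h1.symm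
          · exact absurd ((List.pairwise_cons.mp hrest).1 c h1) (not_le_of_gt hcd)
        constructor
        · have : (d :: t).count c = 0 := List.count_eq_zero.mpr hnot
          simp [hd, this]
        · simpa [List.dropWhile_cons, hd] using hnot

-- B's loop in closed form, on a sorted list
lemma bRuns_spec (s : List Char) (c2 c3 : Bool) :
    s.Pairwise (· ≤ ·) →
    bRuns s c2 c3 = (c2 || decide (∃ c ∈ s, s.count c = 2),
                     c3 || decide (∃ c ∈ s, s.count c = 3)) := by
  induction s, c2, c3 using bRuns.induct with
  | case1 c2 c3 => intro _; simp [bRuns]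
  | case2 c rest c2 c3 runv ih =>
      intro h
      rcases run_facts c rest h with ⟨hlen, hout⟩
      have hsub : List.Sublist (rest.dropWhile (· == c)) (c :: rest) :=
        (List.dropWhile_sublist _).trans (List.sublist_cons_self _ _)
      have hsorted : (rest.dropWhile (· == c)).Pairwise (· ≤ ·) := h.sublist hsub
      have hrv : runv = 1 + (rest.takeWhile (· == c)).length := rfl
      simp only [dite_eq_ite, hrv] at ih
      rw [bRuns, ih hsorted]
      have hcount : (c :: rest).count c = 1 + rest.count c := by
        simp; omega
      -- counts of d ≠ c agree between c :: rest and the dropped suffix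
      have hco : ∀ d, d ≠ c → (c :: rest).count d = (rest.dropWhile (· == c)).count d := by
        intro d hd
        have hsplit := List.takeWhile_append_dropWhile (p := (· == c)) (l := rest)
        have htw : (rest.takeWhile (· == c)).count d = 0 := by
          refine List.count_eq_zero.mpr ?_
          intro hm
          have := List.mem_takeWhile_imp hm
          exact hd (by simpa using this)
        have h2 : rest.count d = (rest.takeWhile (· == c)).count d + (rest.dropWhile (· == c)).count d := by
          rw [← List.count_append, hsplit]
        simp [Ne.symm hd, h2, htw]
      have hmem : ∀ d, d ∈ c :: rest ↔ d = c ∨ d ∈ rest.dropWhile (· == c) := by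
        intro d
        constructor
        · intro hm
          by_cases hd : d = c
          · exact Or.inl hd
          · rcases List.mem_cons.mp hm with h1 | h1
            · exact Or.inl h1
            · refine Or.inr ?_
              have hsplit := List.takeWhile_append_dropWhile (p := (· == c)) (l := rest)
              rw [← hsplit] at h1
              rcases List.mem_append.mp h1 with h2 | h2
              · exact absurd (by simpa using List.mem_takeWhile_imp h2) hd
              · exact h2
        · rintro (rfl | hm)
          · simp
          · exact List.mem_cons.mpr (Or.inr (List.Sublist.mem hm (List.dropWhile_sublist _)))
      have key : ∀ k : Nat, (∃ d ∈ c :: rest, (c :: rest).count d = k)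
          ↔ ((c :: rest).count c = k ∨ ∃ d ∈ rest.dropWhile (· == c), (rest.dropWhile (· == c)).count d = k) := by
        intro k
        constructor
        · rintro ⟨d, hdmem, hdcnt⟩
          by_cases hd : d = c
          · subst hd; exact Or.inl hdcnt
          · rcases (hmem d).mp hdmem with h1 | h1
            · exact absurd h1 hd
            · exact Or.inr ⟨d, h1, by rw [← hco d hd]; exact hdcnt⟩
        · rintro (h1 | ⟨d, hdmem, hdcnt⟩)
          · exact ⟨c, by simp, h1⟩
          · have hd : d ≠ c := by
              rintro rfl; exact hout hdmem
            exact ⟨d, (hmem d).mpr (Or.inr hdmem), by rw [hco d hd]; exact hdcnt⟩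
      have hrun : 1 + (rest.takeWhile (· == c)).length = (c :: rest).count c := by
        rw [hlen, hcount]
      simp only [hrun, Prod.mk.injEq]
      constructor <;>
      · rw [Bool.eq_iff_iff]
        simp only [Bool.or_eq_true, decide_eq_true_eq, key]
        split_ifs with hh <;> tauto

-- A's loop in closed form, over the original character list
lemma A_char (l : List Char) :
    getStringCounter (String.ofList l)
      = (decide (∃ c ∈ l, l.count c = 2), decide (∃ c ∈ l, l.count c = 3)) := by
  unfold getStringCounter
  simp only [String.toList_ofList]
  have hv : (PySem.Dict.counter l).values
      = (PySem.Set.ofList l).map (fun k => (l.count k : Int)) := by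
    show ((PySem.Dict.counter l).items.map (·.2)) = _
    rw [PySem.Dict.items_counter]
    simp [List.map_map, Function.comp]
  rw [hv, foldFlag]
  simp only [Prod.mk.injEq, Bool.false_or]
  constructor <;>
  · simp only [List.any_map]
    rw [Bool.eq_iff_iff]
    simp only [List.any_eq_true, decide_eq_true_eq, beq_iff_eq, Function.comp]
    constructor
    · rintro ⟨x, hx, he⟩
      exact ⟨x, (PySem.Set.mem_ofList l x).mp hx, by omega⟩
    · rintro ⟨x, hx, he⟩
      exact ⟨x, (PySem.Set.mem_ofList l x).mpr hx, by omega⟩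

-- ===== VERDICT (by name: the statement is the Claim_ definition above) =====
theorem getStringCounter_spec : Claim_equal_getStringCounter := by
  intro string _
  unfold Spec_getStringCounter getStringCounter_alt
  have hA := A_char string.toList
  rw [String.ofList_toList] at hA
  set l := string.toList with hl
  set s := PySem.List.sorted l (fun x => x) false with hs
  have hperm : s.Perm l := PySem.List.sorted_perm _ _ _
  have hsorted : s.Pairwise (· ≤ ·) := by
    simpa using PySem.List.sorted_pairwise (xs := l) (key := fun x => x)
  rw [hA, bRuns_spec s false false hsorted]
  have hcnt : ∀ c, s.count c = l.count c := fun c => hperm.count_eq c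
  have hm : ∀ c, c ∈ s ↔ c ∈ l := fun c => hperm.mem_iff
  simp only [Bool.false_or, Prod.mk.injEq]
  refine ⟨?_, ?_⟩ <;> (rw [decide_eq_decide]; constructor <;>
    (rintro ⟨c, h1, h2⟩; exact ⟨c, by rw [hm c] at *; exact h1, by rw [hcnt c] at *; exact h2⟩))
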